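-- pv_equiv track=rewrite | github.com/ShararehY/DQN-robot-stability | DQNAgent.py | combs
-- ===== SOURCE A (Python) =====
-- def combs(range_size):
--     result=[]
--     for x in range(1,range_size[0]+1):
--         for y in range(1,range_size[1]+1):
--             for z in range(1,range_size[2]+1):
--                 combination = (x,y,z)
--                 result.append(combination)
--     return result
-- ===== SOURCE B (Python) =====
-- def combs(range_size):
--     a = max(range_size[0], 0)
--     b = max(range_size[1], 0)
--     c = max(range_size[2], 0)
--     return [(i // (b * c) + 1, (i // c) % b + 1, i % c + 1)
--             for i in range(a * b * c)]
-- ===== Notes on version B (the rewrite author's own statement) =====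
-- stated objective: alternative
-- what changed: Replaces the three nested loops by one pass over a single flat index i in range(a*b*c), decoding i as a mixed-radix counter (i//(b*c)+1, (i//c)%b+1, i%c+1); dimensions are clamped to 0 so empty/negative sizes give the same empty product.
import Mathlib
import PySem

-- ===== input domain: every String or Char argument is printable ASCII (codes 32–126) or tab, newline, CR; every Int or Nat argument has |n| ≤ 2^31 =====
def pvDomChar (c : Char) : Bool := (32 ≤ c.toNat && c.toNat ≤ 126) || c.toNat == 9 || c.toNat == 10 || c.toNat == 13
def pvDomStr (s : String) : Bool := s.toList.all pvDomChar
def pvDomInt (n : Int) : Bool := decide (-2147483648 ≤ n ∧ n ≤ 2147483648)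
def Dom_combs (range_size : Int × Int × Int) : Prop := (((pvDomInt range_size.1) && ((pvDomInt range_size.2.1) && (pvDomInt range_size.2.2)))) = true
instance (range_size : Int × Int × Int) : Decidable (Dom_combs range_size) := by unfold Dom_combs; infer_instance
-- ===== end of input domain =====

-- B replaces the three nested loops by one pass over a flat index decoded as a mixed-radix counter (alternative decomposition, same cost).

-- ===== PORT A =====
def combs (range_size : Int × Int × Int) : List (Int × Int × Int) :=
  (PySem.List.pyRange 1 (range_size.1 + 1) 1).foldl (fun result x =>
    (PySem.List.pyRange 1 (range_size.2.1 + 1) 1).foldl (fun result y =>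
      (PySem.List.pyRange 1 (range_size.2.2 + 1) 1).foldl (fun result z =>
        result ++ [(x, y, z)]) result) result) []

-- ===== PORT B =====
def combs_alt (range_size : Int × Int × Int) : List (Int × Int × Int) :=
  let a := max range_size.1 0
  let b := max range_size.2.1 0
  let c := max range_size.2.2 0
  (PySem.List.pyRange 0 (a * b * c) 1).map (fun i =>
    (PySem.Int.floordiv i (b * c) + 1,
     PySem.Int.mod (PySem.Int.floordiv i c) b + 1,
     PySem.Int.mod i c + 1))

-- ===== PRECONDITION & SPEC =====
def Spec_combs (range_size : Int × Int × Int) (out : List (Int × Int × Int)) : Prop := out = combs_alt range_size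
instance (range_size : Int × Int × Int) (out : List (Int × Int × Int)) : Decidable (Spec_combs range_size out) := by unfold Spec_combs; infer_instance

-- ===== CLAIM (what is proved, stated in full; the proofs are below) =====
def Claim_equal_combs : Prop := ∀ (range_size : Int × Int × Int), Dom_combs range_size → Spec_combs range_size (combs range_size)

-- ===== LEMMAS AND PROOFS =====

-- Two nested ranges flattened into one flat range with div/mod decoding (over ℕ).
theorem flat2 {α : Type} (m c : ℕ) (g : ℕ → ℕ → α) :
    (List.range m).flatMap (fun y => (List.range c).map (fun z => g y z)) =
      (List.range (m * c)).map (fun i => g (i / c) (i % c)) := by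
  induction m with
  | zero => simp
  | succ m ih =>
    rw [List.range_succ, List.flatMap_append, ih, Nat.succ_mul, List.range_add,
        List.map_append]
    congr 1
    simp only [List.flatMap_cons, List.flatMap_nil, List.append_nil, List.map_map]
    refine List.map_congr_left fun z hz => ?_
    have hzc : z < c := List.mem_range.mp hz
    have hc : 0 < c := by omega
    simp [Nat.mul_comm m c, Nat.mul_add_div hc, Nat.div_eq_of_lt hzc, Nat.mod_eq_of_lt hzc]

-- Three nested ranges flattened (over ℕ).
theorem flat3 {α : Type} (a b c : ℕ) (g : ℕ → ℕ → ℕ → α) :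
    (List.range a).flatMap (fun x => (List.range b).flatMap (fun y =>
        (List.range c).map (fun z => g x y z))) =
      (List.range (a * b * c)).map (fun i => g (i / (b * c)) (i / c % b) (i % c)) := by
  have h1 : ∀ x, (List.range b).flatMap (fun y => (List.range c).map (fun z => g x y z)) =
      (List.range (b * c)).map (fun j => g x (j / c) (j % c)) := fun x => flat2 b c _
  calc (List.range a).flatMap (fun x => (List.range b).flatMap (fun y =>
          (List.range c).map (fun z => g x y z)))
      = (List.range a).flatMap (fun x =>
          (List.range (b * c)).map (fun j => g x (j / c) (j % c))) := by
        exact List.flatMap_congr fun x _ => h1 x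
    _ = (List.range (a * (b * c))).map
          (fun i => g (i / (b * c)) (i % (b * c) / c) (i % (b * c) % c)) :=
        flat2 a (b * c) _
    _ = (List.range (a * b * c)).map (fun i => g (i / (b * c)) (i / c % b) (i % c)) := by
        rw [Nat.mul_assoc]
        refine List.map_congr_left fun i _ => ?_
        have h2 : i % (b * c) / c = i / c % b := by
          rw [Nat.mul_comm b c]; exact Nat.mod_mul_right_div_self i c b
        have h3 : i % (b * c) % c = i % c := Nat.mod_mod_of_dvd i ⟨b, Nat.mul_comm b c⟩
        rw [h2, h3]

-- One appending loop is a map (from PySem); two nested appending loops are a flatMap.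
theorem fold2_eq_flatMap {a b d : Type} (L2 : List a) (L3 : List b) (f : a -> b -> d)
    (acc : List d) :
    L2.foldl (fun acc y => L3.foldl (fun acc z => acc ++ [f y z]) acc) acc =
      acc ++ L2.flatMap (fun y => L3.map (f y)) := by
  induction L2 generalizing acc with
  | nil => simp
  | cons y t ih =>
    simp only [List.foldl_cons, List.flatMap_cons]
    rw [PySem.List.foldl_append_singleton_eq_map, ih, List.append_assoc]

-- Three nested appending loops are a nested flatMap.
theorem fold3_eq_flatMap {a b c d : Type} (L1 : List a) (L2 : List b) (L3 : List c)
    (f : a -> b -> c -> d) (acc : List d) :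
    L1.foldl (fun acc x =>
      L2.foldl (fun acc y => L3.foldl (fun acc z => acc ++ [f x y z]) acc) acc) acc =
      acc ++ L1.flatMap (fun x => L2.flatMap (fun y => L3.map (f x y))) := by
  induction L1 generalizing acc with
  | nil => simp
  | cons x t ih =>
    simp only [List.foldl_cons, List.flatMap_cons]
    rw [fold2_eq_flatMap, ih, List.append_assoc]

-- A as a flatMap over nested ranges.
theorem combs_eq_flatMap (r : Int × Int × Int) :
    combs r = (List.range r.1.toNat).flatMap (fun (x : ℕ) =>
      (List.range r.2.1.toNat).flatMap (fun (y : ℕ) =>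
        (List.range r.2.2.toNat).map (fun (z : ℕ) =>
          (((1 + (x : Int)) : Int), ((1 + (y : Int)) : Int), ((1 + (z : Int)) : Int))))) := by
  unfold combs
  rw [PySem.List.pyRange_one 1 (r.1 + 1), PySem.List.pyRange_one 1 (r.2.1 + 1),
      PySem.List.pyRange_one 1 (r.2.2 + 1)]
  have h1 : (r.1 + 1 - 1).toNat = r.1.toNat := by omega
  have h2 : (r.2.1 + 1 - 1).toNat = r.2.1.toNat := by omega
  have h3 : (r.2.2 + 1 - 1).toNat = r.2.2.toNat := by omega
  rw [h1, h2, h3]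
  simp only [List.foldl_map]
  rw [fold3_eq_flatMap (List.range r.1.toNat) (List.range r.2.1.toNat)
      (List.range r.2.2.toNat)
      (fun (x y z : ℕ) => (((1 + (x : Int)) : Int), ((1 + (y : Int)) : Int), ((1 + (z : Int)) : Int))) []]
  simp

-- B as a map over a flat Nat range.
theorem combs_alt_eq_map (r : Int × Int × Int) :
    combs_alt r = (List.range (r.1.toNat * r.2.1.toNat * r.2.2.toNat)).map (fun i =>
      (((i / (r.2.1.toNat * r.2.2.toNat) : ℕ) : Int) + 1,
       ((i / r.2.2.toNat % r.2.1.toNat : ℕ) : Int) + 1,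
       ((i % r.2.2.toNat : ℕ) : Int) + 1)) := by
  unfold combs_alt
  have ha : max r.1 0 = (r.1.toNat : Int) := by omega
  have hb : max r.2.1 0 = (r.2.1.toNat : Int) := by omega
  have hc : max r.2.2 0 = (r.2.2.toNat : Int) := by omega
  simp only [ha, hb, hc]
  rw [show ((r.1.toNat : Int) * (r.2.1.toNat : Int) * (r.2.2.toNat : Int)) =
      ((r.1.toNat * r.2.1.toNat * r.2.2.toNat : ℕ) : Int) by push_cast; ring]
  rw [PySem.List.pyRange_zero_nat]
  rw [List.map_map]
  refine List.map_congr_left fun i _ => ?_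
  simp only [Function.comp]
  rw [show ((r.2.1.toNat : Int) * (r.2.2.toNat : Int)) = ((r.2.1.toNat * r.2.2.toNat : ℕ) : Int)
      by push_cast; ring]
  rw [PySem.Int.floordiv_natCast, PySem.Int.floordiv_natCast, PySem.Int.mod_natCast,
      PySem.Int.mod_natCast]

-- ===== VERDICT (by name: the statement is the Claim_ definition above) =====
theorem combs_spec : Claim_equal_combs := by
  intro r _
  unfold Spec_combs
  rw [combs_eq_flatMap, combs_alt_eq_map,
      flat3 r.1.toNat r.2.1.toNat r.2.2.toNat
        (fun x y z => ((1 + (x : Int)), (1 + (y : Int)), (1 + (z : Int))))]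
  refine List.map_congr_left fun i _ => ?_
  simp [Int.add_comm]
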